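-- pv_equiv track=rewrite | github.com/ARGANS/SO-FRESH | src/data/fusion/fusion_toolkit.py | band_selector
-- ===== SOURCE A (Python) =====
-- def band_selector(products):
--
--     """ Based on order entry, find out which bands correspond to which data. """
--
--     products_dict = dict.fromkeys(products)
--     count=0
--     for p in products:
--         if p == "MYD09GA":
--             start=count
--             count=count+3
--             products_dict[p]=start,count
--         elif p == "MYDTBGA" or "SIC":
--             start=count
--             count=count+1
--             products_dict[p]=(start,count)
--
--     return(products_dict)
-- ===== SOURCE B (Python) =====
-- def band_selector(products):
--     """ Based on order entry, find out which bands correspond to which data. """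
--     # Width table first, then a prefix-sum table of running end positions,
--     # then one assignment pass into a dict pre-seeded in first-occurrence order.
--     widths = [3 if p == "MYD09GA" else 1 for p in products]
--     ends = []
--     total = 0
--     for w in widths:
--         total += w
--         ends.append(total)
--     out = dict.fromkeys(products)
--     for p, w, e in zip(products, widths, ends):
--         out[p] = (e - w, e)
--     return out
-- ===== Notes on version B (the rewrite author's own statement) =====
-- stated objective: alternative
-- what changed: Replaces the inline accumulator-with-branch loop (which tracks a running count and assigns ranges as it goes) by a width table plus a separately built prefix-sum table of end positions, followed by a plain assignment pass zipping products with their precomputed (end-width, end) ranges.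
import Mathlib
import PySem

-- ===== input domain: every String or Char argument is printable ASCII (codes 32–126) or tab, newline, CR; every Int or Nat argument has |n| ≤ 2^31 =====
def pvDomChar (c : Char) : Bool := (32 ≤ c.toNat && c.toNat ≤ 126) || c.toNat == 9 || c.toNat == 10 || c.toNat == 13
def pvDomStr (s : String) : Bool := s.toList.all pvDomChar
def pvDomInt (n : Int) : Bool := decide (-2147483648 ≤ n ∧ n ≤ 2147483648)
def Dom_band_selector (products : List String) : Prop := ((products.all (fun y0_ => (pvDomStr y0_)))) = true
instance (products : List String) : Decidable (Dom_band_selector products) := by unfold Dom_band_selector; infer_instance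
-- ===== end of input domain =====

-- B builds the prefix-sum table of band end positions first and then assigns ranges in a
-- separate zip pass, instead of A's single loop carrying a running counter; same cost, different shape.

-- ===== PORT A =====
-- Python returns the dict; values are Option only until the loop overwrites them (the elif
-- condition `p == "MYDTBGA" or "SIC"` is always truthy, so every key is assigned); the final
-- filterMap is the dict → association-list conversion dropping the (never surviving) `none`s.
/-- one iteration of A's loop body (state = (products_dict, count)) -/
def stepA (st : PySem.Dict String (Option (Int × Int)) × Int) (p : String) :
    PySem.Dict String (Option (Int × Int)) × Int :=
  if p == "MYD09GA" then
    let start := st.2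
    let count := st.2 + 3
    (st.1.insert p (some (start, count)), count)
  else if (p == "MYDTBGA") || true then                             -- `p == "MYDTBGA" or "SIC"`
    let start := st.2
    let count := st.2 + 1
    (st.1.insert p (some (start, count)), count)
  else st

def band_selector (products : List String) : List (String × Int × Int) :=
  let d0 : PySem.Dict String (Option (Int × Int)) :=
    products.foldl (fun d p => d.insert p none) PySem.Dict.empty   -- dict.fromkeys(products)
  let st := products.foldl stepA (d0, 0)
  st.1.items.filterMap (fun kv => kv.2.map (fun v => (kv.1, v)))

-- ===== PORT B =====
def bWidth (p : String) : Int := if p == "MYD09GA" then 3 else 1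

def band_selector_alt (products : List String) : List (String × Int × Int) :=
  let widths := products.map bWidth
  let ends := (widths.foldl (fun (st : List Int × Int) w => (st.1 ++ [st.2 + w], st.2 + w)) ([], 0)).1
  let out0 : PySem.Dict String (Option (Int × Int)) :=
    products.foldl (fun d p => d.insert p none) PySem.Dict.empty   -- dict.fromkeys(products)
  let out := (products.zip (widths.zip ends)).foldl
    (fun d pwe => d.insert pwe.1 (some (pwe.2.2 - pwe.2.1, pwe.2.2))) out0
  out.items.filterMap (fun kv => kv.2.map (fun v => (kv.1, v)))

-- ===== PRECONDITION & SPEC =====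
def Spec_band_selector (products : List String) (out : List (String × Int × Int)) : Prop := out = band_selector_alt products
instance (products : List String) (out : List (String × Int × Int)) : Decidable (Spec_band_selector products out) := by unfold Spec_band_selector; infer_instance

-- ===== CLAIM (what is proved, stated in full; the proofs are below) =====
def Claim_equal_band_selector : Prop := ∀ (products : List String), Dom_band_selector products → Spec_band_selector products (band_selector products)

-- ===== LEMMAS AND PROOFS =====

/-- Running end positions of the bands, starting from offset `t`. -/
def endsW (t : Int) : List Int → List Int
  | [] => []
  | w :: ws => (t + w) :: endsW (t + w) ws

lemma ends_fold (ws : List Int) (acc : List Int) (t : Int) :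
    (ws.foldl (fun (st : List Int × Int) w => (st.1 ++ [st.2 + w], st.2 + w)) (acc, t)).1
      = acc ++ endsW t ws := by
  induction ws generalizing acc t with
  | nil => simp [endsW]
  | cons w ws ih => simp [List.foldl, endsW, ih, List.append_assoc]

lemma loops_eq (ps : List String) (d : PySem.Dict String (Option (Int × Int))) (c : Int) :
    (ps.foldl stepA (d, c)).1
    = (ps.zip ((ps.map bWidth).zip (endsW c (ps.map bWidth)))).foldl
        (fun d pwe => d.insert pwe.1 (some (pwe.2.2 - pwe.2.1, pwe.2.2))) d := by
  induction ps generalizing d c with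
  | nil => rfl
  | cons p ps ih =>
    have hA : stepA (d, c) p = (d.insert p (some (c, c + bWidth p)), c + bWidth p) := by
      by_cases h : p = "MYD09GA" <;> simp [stepA, bWidth, h]
    have hv : c + bWidth p - bWidth p = c := by ring
    simp only [List.map_cons, endsW, List.zip_cons_cons, List.foldl_cons, hA, hv]
    exact ih _ _

theorem band_selector_spec : Claim_equal_band_selector := by
  intro products _
  unfold Spec_band_selector band_selector band_selector_alt
  simp only [ends_fold, List.nil_append, loops_eq]
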